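-- pv_equiv track=rewrite | github.com/popomaro516/ai-playground | mat_ssl/datasets/lazy_mat.py | _interpret_image_shape
-- ===== SOURCE A (Python) =====
-- from typing import List, Optional, Tuple, Sequence, Dict, Any
--
-- def _interpret_image_shape(
--     shape: Tuple[int, ...], override: Optional[Tuple[int, ...]] = None
-- ) -> Tuple[int, int, int, int, Tuple[int, ...]]:
--     """Infer N, C, H, W and axes order given a shape.
--
--     Returns (N, C, H, W, axes) where axes maps original axes to the logical order
--     (N, C, H, W). For 2D grayscale (N, H, W) inputs the channel dimension is
--     synthesized and axes is length 3 (mapping to N, H, W).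
--     """
--     if override is not None:
--         axes = tuple(override)
--         rank = len(shape)
--         if len(axes) not in (3, 4):
--             raise ValueError("image_axes override must have length 3 or 4")
--         if len(axes) != rank:
--             raise ValueError(f"image_axes override length {len(axes)} does not match rank {rank}")
--         dims = [shape[a] for a in axes]
--         if len(axes) == 4:
--             n, c, h, w = dims
--             return n, c, h, w, axes
--         else:
--             n, h, w = dims
--             return n, 1, h, w, axes
--
--     rank = len(shape)
--     if rank == 4:
--         candidates = [
--             (0, 3, 1, 2),  # N,H,W,C -> N,C,H,W
--             (0, 1, 2, 3),  # N,C,H,W -> N,C,H,W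
--             (3, 2, 0, 1),  # H,W,C,N -> N,C,H,W
--             (3, 0, 1, 2),  # C,H,W,N -> N,C,H,W
--         ]
--         for axes in candidates:
--             n = shape[axes[0]]
--             c = shape[axes[1]]
--             h = shape[axes[2]]
--             w = shape[axes[3]]
--             if all(x > 0 for x in (n, c, h, w)):
--                 return n, c, h, w, axes
--         raise ValueError(f"Unable to infer N,C,H,W from shape {shape}")
--     elif rank == 3:
--         candidates = [
--             (0, 1, 2),  # N,H,W
--             (0, 2, 1),  # N,W,H
--             (2, 0, 1),  # W,N,H
--             (2, 1, 0),  # W,H,N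
--             (1, 0, 2),  # H,N,W
--             (1, 2, 0),  # H,W,N
--         ]
--         for axes in candidates:
--             n = shape[axes[0]]
--             h = shape[axes[1]]
--             w = shape[axes[2]]
--             if all(x > 0 for x in (n, h, w)):
--                 return n, 1, h, w, axes
--         raise ValueError(f"Unable to infer N,H,W from shape {shape}")
--     else:
--         raise ValueError(f"Unsupported image rank {rank}; expected 3D/4D, got {shape}")
-- ===== SOURCE B (Python) =====
-- def _interpret_image_shape(shape, override=None):
--     if override is not None:
--         axes = tuple(override)
--         rank = len(shape)
--         if len(axes) not in (3, 4):
--             raise ValueError("image_axes override must have length 3 or 4")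
--         if len(axes) != rank:
--             raise ValueError(f"image_axes override length {len(axes)} does not match rank {rank}")
--         dims = tuple(shape[a] for a in axes)
--         if rank == 4:
--             return dims[0], dims[1], dims[2], dims[3], axes
--         return dims[0], 1, dims[1], dims[2], axes
--     rank = len(shape)
--     if rank not in (3, 4):
--         raise ValueError(f"Unsupported image rank {rank}; expected 3D/4D, got {shape}")
--     if any(x <= 0 for x in shape):
--         # every candidate permutation tests positivity of the same multiset of dims,
--         # so either all fail or the first succeeds
--         if rank == 4:
--             raise ValueError(f"Unable to infer N,C,H,W from shape {shape}")
--         raise ValueError(f"Unable to infer N,H,W from shape {shape}")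
--     if rank == 4:
--         return shape[0], shape[3], shape[1], shape[2], (0, 3, 1, 2)
--     return shape[0], 1, shape[1], shape[2], (0, 1, 2)
-- ===== Notes on version B (the rewrite author's own statement) =====
-- stated objective: simpler
-- what changed: The candidate-axes loops are removed: since every candidate tests positivity of a permutation of the same dims, B uses one all-positive guard and returns the first ordering directly, with no loop and no candidate tables.
import Mathlib
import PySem

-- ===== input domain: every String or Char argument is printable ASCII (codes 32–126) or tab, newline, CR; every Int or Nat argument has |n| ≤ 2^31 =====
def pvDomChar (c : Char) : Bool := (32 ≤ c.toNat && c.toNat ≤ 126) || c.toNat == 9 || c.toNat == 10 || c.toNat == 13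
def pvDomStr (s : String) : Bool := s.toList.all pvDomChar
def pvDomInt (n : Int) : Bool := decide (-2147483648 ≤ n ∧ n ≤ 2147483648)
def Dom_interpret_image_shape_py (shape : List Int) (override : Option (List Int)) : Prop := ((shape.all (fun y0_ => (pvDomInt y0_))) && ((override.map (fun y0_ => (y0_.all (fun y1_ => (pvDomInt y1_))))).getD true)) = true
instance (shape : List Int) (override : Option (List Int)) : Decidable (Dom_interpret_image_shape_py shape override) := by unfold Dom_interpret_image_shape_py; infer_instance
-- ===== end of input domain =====

-- B removes A's candidate-axes loops: every candidate tests positivity of a permutation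
-- of the same dims, so one all-positive guard plus the first ordering suffices (simpler).


-- ===== PORT A =====
-- shape[i] on Pre_-admitted inputs (index always in range there); 0 default only outside Pre_
def pvGetD (xs : List Int) (i : Int) : Int := (PySem.List.pyGet? xs i).getD 0

-- the rank-4 candidate loop of A
def pvLoop4 (shape : List Int) : List (List Int) → Int × Int × Int × Int × List Int
  | [] => (0, 0, 0, 0, [])  -- raise ValueError
  | axes :: rest =>
      let n := pvGetD shape (pvGetD axes 0)
      let c := pvGetD shape (pvGetD axes 1)
      let h := pvGetD shape (pvGetD axes 2)
      let w := pvGetD shape (pvGetD axes 3)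
      if n > 0 ∧ c > 0 ∧ h > 0 ∧ w > 0 then (n, c, h, w, axes) else pvLoop4 shape rest

-- the rank-3 candidate loop of A
def pvLoop3 (shape : List Int) : List (List Int) → Int × Int × Int × Int × List Int
  | [] => (0, 0, 0, 0, [])  -- raise ValueError
  | axes :: rest =>
      let n := pvGetD shape (pvGetD axes 0)
      let h := pvGetD shape (pvGetD axes 1)
      let w := pvGetD shape (pvGetD axes 2)
      if n > 0 ∧ h > 0 ∧ w > 0 then (n, 1, h, w, axes) else pvLoop3 shape rest

def interpret_image_shape_py (shape : List Int) (override : Option (List Int)) : Int × Int × Int × Int × List Int :=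
  match override with
  | some ov =>
      let axes := ov
      let rank := shape.length
      if axes.length ≠ 3 ∧ axes.length ≠ 4 then (0, 0, 0, 0, [])  -- raise ValueError
      else if axes.length ≠ rank then (0, 0, 0, 0, [])  -- raise ValueError
      else
        let dims := axes.map (fun a => pvGetD shape a)
        if axes.length = 4 then
          (pvGetD dims 0, pvGetD dims 1, pvGetD dims 2, pvGetD dims 3, axes)
        else
          (pvGetD dims 0, 1, pvGetD dims 1, pvGetD dims 2, axes)
  | none =>
      let rank := shape.length
      if rank = 4 then
        pvLoop4 shape [[0, 3, 1, 2], [0, 1, 2, 3], [3, 2, 0, 1], [3, 0, 1, 2]]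
      else if rank = 3 then
        pvLoop3 shape [[0, 1, 2], [0, 2, 1], [2, 0, 1], [2, 1, 0], [1, 0, 2], [1, 2, 0]]
      else (0, 0, 0, 0, [])  -- raise ValueError

-- ===== PORT B =====
def interpret_image_shape_py_alt (shape : List Int) (override : Option (List Int)) : Int × Int × Int × Int × List Int :=
  match override with
  | some axes =>
      let rank := shape.length
      if axes.length ≠ 3 ∧ axes.length ≠ 4 then (0, 0, 0, 0, [])  -- raise ValueError
      else if axes.length ≠ rank then (0, 0, 0, 0, [])  -- raise ValueError
      else
        let dims := axes.map (fun a => pvGetD shape a)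
        if rank = 4 then
          (pvGetD dims 0, pvGetD dims 1, pvGetD dims 2, pvGetD dims 3, axes)
        else
          (pvGetD dims 0, 1, pvGetD dims 1, pvGetD dims 2, axes)
  | none =>
      let rank := shape.length
      if rank ≠ 3 ∧ rank ≠ 4 then (0, 0, 0, 0, [])  -- raise ValueError
      else if shape.any (fun x => x ≤ 0) then (0, 0, 0, 0, [])  -- raise ValueError
      else if rank = 4 then
        (pvGetD shape 0, pvGetD shape 3, pvGetD shape 1, pvGetD shape 2, [0, 3, 1, 2])
      else
        (pvGetD shape 0, 1, pvGetD shape 1, pvGetD shape 2, [0, 1, 2])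

-- ===== PRECONDITION & SPEC =====
-- Pre_ excludes exactly the inputs where A raises ValueError/IndexError: bad override
-- length, override indices out of range, unsupported rank, or a non-positive dimension.
def Pre_interpret_image_shape_py (shape : List Int) (override : Option (List Int)) : Prop :=
  match override with
  | some axes =>
      (axes.length = 3 ∨ axes.length = 4) ∧ axes.length = shape.length ∧
      ∀ a ∈ axes, -(shape.length : Int) ≤ a ∧ a < (shape.length : Int)
  | none => (shape.length = 3 ∨ shape.length = 4) ∧ ∀ x ∈ shape, 0 < x
instance (shape : List Int) (override : Option (List Int)) : Decidable (Pre_interpret_image_shape_py shape override) := by unfold Pre_interpret_image_shape_py; cases override <;> infer_instance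

def pvWitness_interpret_image_shape_py : List Int × Option (List Int) := ([2, 3, 4, 5], none)

def Spec_interpret_image_shape_py (shape : List Int) (override : Option (List Int)) (out : Int × Int × Int × Int × List Int) : Prop := out = interpret_image_shape_py_alt shape override
instance (shape : List Int) (override : Option (List Int)) (out : Int × Int × Int × Int × List Int) : Decidable (Spec_interpret_image_shape_py shape override out) := by unfold Spec_interpret_image_shape_py; infer_instance

-- ===== CLAIM (what is proved, stated in full; the proofs are below) =====
def Claim_equal_interpret_image_shape_py : Prop := ∀ (shape : List Int) (override : Option (List Int)), Dom_interpret_image_shape_py shape override → Pre_interpret_image_shape_py shape override → Spec_interpret_image_shape_py shape override (interpret_image_shape_py shape override)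

-- ===== LEMMAS AND PROOFS =====

-- ===== VERDICT (by name: the statement is the Claim_ definition above) =====
theorem interpret_image_shape_py_spec : Claim_equal_interpret_image_shape_py := by
  intro shape override _ hpre
  unfold Spec_interpret_image_shape_py
  match override with
  | some axes =>
      obtain ⟨h34, hlen, _⟩ := hpre
      simp only [interpret_image_shape_py, interpret_image_shape_py_alt, hlen]
  | none =>
      obtain ⟨h34, hpos⟩ := hpre
      rcases h34 with h3 | h4
      · match shape, h3 with
        | [a, b, c], _ =>
          have ha := hpos a (by simp); have hb := hpos b (by simp); have hc := hpos c (by simp)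
          simp [interpret_image_shape_py, interpret_image_shape_py_alt, pvLoop3, pvGetD,
            PySem.List.pyGet?, PySem.List.pyIdx?, ha, hb, hc, le_of_lt]
      · match shape, h4 with
        | [a, b, c, d], _ =>
          have ha := hpos a (by simp); have hb := hpos b (by simp)
          have hc := hpos c (by simp); have hd := hpos d (by simp)
          simp [interpret_image_shape_py, interpret_image_shape_py_alt, pvLoop4, pvGetD,
            PySem.List.pyGet?, PySem.List.pyIdx?, ha, hb, hc, hd, le_of_lt]
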